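-- pv_equiv track=rewrite | github.com/Ckevinfl89/whitedboardday4 | whiteboard.py | solution
-- ===== SOURCE A (Python) =====
-- def solution(str):
--     absent_count = 0
--     late_count = 0
--     for x in str:
--         if x == 'A':
--             absent_count += 1
--             late_count = 0
--         elif x == 'L':
--             late_count += 1
--             if late_count >= 3:
--                 return False
--
--         else:
--             late_count = 0
--     if absent_count > 2:
--         return False
--
--     else:
--         return True
-- ===== SOURCE B (Python) =====
-- def solution(str):
--     return str.count('A') < 3 and 'LLL' not in str
-- ===== Notes on version B (the rewrite author's own statement) =====
-- stated objective: idiomatic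
-- what changed: Replaces the stateful single pass with two counters and early return by two C-level library scans: an occurrence count for absences and a substring test for three consecutive lates.
import Mathlib
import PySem

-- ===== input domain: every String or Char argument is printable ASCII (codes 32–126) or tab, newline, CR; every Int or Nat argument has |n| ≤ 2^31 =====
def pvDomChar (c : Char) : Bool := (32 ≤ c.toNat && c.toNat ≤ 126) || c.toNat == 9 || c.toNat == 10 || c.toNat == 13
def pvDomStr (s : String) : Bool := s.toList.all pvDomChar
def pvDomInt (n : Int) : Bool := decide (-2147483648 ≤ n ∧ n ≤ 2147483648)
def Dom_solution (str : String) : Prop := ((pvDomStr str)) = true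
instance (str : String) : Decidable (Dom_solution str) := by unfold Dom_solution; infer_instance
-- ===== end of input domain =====

-- B replaces A's stateful counter loop with two library scans (occurrence count and substring test); objective: idiomatic.


-- ===== PORT A =====
-- A's for-loop over the characters, carrying absent_count and late_count; early `return False`
-- becomes returning `false` from the recursion.
def solutionLoopA : List Char → Nat → Nat → Bool
  | [], absent_count, _ => if absent_count > 2 then false else true
  | x :: rest, absent_count, late_count =>
    if x = 'A' then solutionLoopA rest (absent_count + 1) 0
    else if x = 'L' then
      if late_count + 1 ≥ 3 then false else solutionLoopA rest absent_count (late_count + 1)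
    else solutionLoopA rest absent_count 0

def solution (str : String) : Bool := solutionLoopA str.toList 0 0

-- ===== PORT B =====
def solution_alt (str : String) : Bool :=
  decide (PySem.Str.count str "A" < 3) && !(PySem.Str.isIn "LLL" str)

-- ===== PRECONDITION & SPEC =====
def Spec_solution (str : String) (out : Bool) : Prop := out = solution_alt str
instance (str : String) (out : Bool) : Decidable (Spec_solution str out) := by unfold Spec_solution; infer_instance

-- ===== CLAIM (what is proved, stated in full; the proofs are below) =====
def Claim_equal_solution : Prop := ∀ (str : String), Dom_solution str → Spec_solution str (solution str)

-- ===== LEMMAS AND PROOFS =====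

-- PySem.Chars.count.go with a one-character needle counts occurrences of that character.
theorem countGo_singleton (c : Char) : ∀ (s : List Char) (acc : Nat),
    PySem.Chars.count.go [c] s.length s acc = acc + s.count c := by
  intro s
  induction s with
  | nil => intro acc; simp [PySem.Chars.count.go]
  | cons h t ih =>
    intro acc
    by_cases hc : c = h
    · subst hc
      simp [PySem.Chars.count.go, List.isPrefixOf, ih, List.count_cons]
      omega
    · have hc' : ¬ (h = c) := fun h' => hc h'.symm
      simp [PySem.Chars.count.go, List.isPrefixOf, hc, hc', ih, List.count_cons]

theorem count_singleton (s : List Char) (c : Char) :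
    PySem.Chars.count s [c] = s.count c := by
  simpa [PySem.Chars.count] using countGo_singleton c s 0

-- whether the tail of the string contains a run of L's that, together with a current
-- streak of `l` lates, reaches length 3 (the state A's loop tracks)
def hasRun : List Char → Nat → Bool
  | [], _ => false
  | x :: rest, l =>
    if x = 'L' then (if l + 1 ≥ 3 then true else hasRun rest (l + 1)) else hasRun rest 0

theorem loopA_eq (cs : List Char) : ∀ (a l : Nat),
    solutionLoopA cs a l = (decide (a + cs.count 'A' ≤ 2) && !(hasRun cs l)) := by
  induction cs with
  | nil => intro a l; by_cases h : a ≤ 2 <;> simp [solutionLoopA, hasRun, h] <;> omega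
  | cons x rest ih =>
    intro a l
    by_cases hA : x = 'A'
    · simp [solutionLoopA, hasRun, hA, ih, List.count_cons]
      congr 1
      simp only [decide_eq_decide]
      omega
    · by_cases hL : x = 'L'
      · by_cases h3 : l + 1 ≥ 3 <;>
          simp [solutionLoopA, hasRun, hA, hL, h3, ih, List.count_cons]
      · simp [solutionLoopA, hasRun, hA, hL, ih, List.count_cons]

theorem hasRun_iff_infix : ∀ (cs : List Char) (l : Nat), l ≤ 2 →
    (hasRun cs l = true ↔ ['L', 'L', 'L'] <:+: (List.replicate l 'L' ++ cs)) := by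
  intro cs
  induction cs with
  | nil =>
    intro l hl
    simp only [hasRun, List.append_nil]
    constructor
    · intro h; cases h
    · intro h; have := h.length_le; simp at this; omega
  | cons x rest ih =>
    intro l hl
    by_cases hL : x = 'L'
    · subst hL
      by_cases h3 : l + 1 ≥ 3
      · have hl2 : l = 2 := by omega
        subst hl2
        simp only [hasRun, ite_self, if_pos h3, ite_true, if_pos rfl]
        refine iff_of_true (by simp [h3]) ⟨[], rest, by simp [List.replicate]⟩
      · have : List.replicate l 'L' ++ 'L' :: rest = List.replicate (l + 1) 'L' ++ rest := by
          simp [List.replicate_succ']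
        rw [this]
        simp only [hasRun, if_pos rfl, if_neg h3]
        exact ih (l + 1) (by omega)
    · have hL' : ¬ (('L' : Char) = x) := fun h' => hL h'.symm
      simp only [hasRun, if_neg hL]
      rw [ih 0 (by omega)]
      simp only [List.replicate_zero, List.nil_append]
      constructor
      · intro h
        exact h.trans ((List.suffix_cons x rest).trans (List.suffix_append _ _)).isInfix
      · intro h
        interval_cases l <;>
          · simp [List.infix_cons_iff, List.cons_prefix_cons, hL', List.replicate] at h
            exact h

theorem solution_eq_alt (str : String) : solution str = solution_alt str := by
  have h1 : PySem.Str.count str "A" = str.toList.count 'A' := by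
    rw [PySem.Str.count_eq]
    simpa using count_singleton str.toList 'A'
  have h2 : PySem.Str.isIn "LLL" str = hasRun str.toList 0 := by
    rcases hb : hasRun str.toList 0 with _ | _
    · rw [Bool.eq_false_iff]
      intro hc
      have := (PySem.Str.isIn_iff_infix "LLL" str).mp hc
      have := (hasRun_iff_infix str.toList 0 (by omega)).mpr (by simpa using this)
      simp [hb] at this
    · exact (PySem.Str.isIn_iff_infix "LLL" str).mpr
        (by simpa using (hasRun_iff_infix str.toList 0 (by omega)).mp hb)
  unfold solution solution_alt
  rw [loopA_eq, h1, h2]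
  congr 1
  simp only [decide_eq_decide]
  omega

-- ===== VERDICT (by name: the statement is the Claim_ definition above) =====
theorem solution_spec : Claim_equal_solution := by
  intro str _
  unfold Spec_solution
  exact solution_eq_alt str
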